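-- pv_equiv track=rewrite | github.com/Yashikab/br_mkdb | src/domain/model/info.py | rentan_keylist
-- ===== SOURCE A (Python) =====
-- def rentan_keylist(rank: int) -> list:
--     """連単用キーのリストを返す.
--
--     Parameters
--     ----------
--         rank : int
--             1 or 2 or 3 で単勝，2連単，3連単
--     """
--     rentan_key_list = []
--     for fst in range(1, 7):
--         if rank == 1:
--             rentan_key_list.append(f"comb_{fst}")
--         else:
--             for snd in range(1, 7):
--                 if snd != fst and rank == 2:
--                     rentan_key_list.append(f"comb_{fst}{snd}")
--                 else:
--                     for trd in range(1, 7):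
--                         if fst != snd and fst != trd and snd != trd:
--                             rentan_key_list.append(f"comb_{fst}{snd}{trd}")
--     return rentan_key_list
-- ===== SOURCE B (Python) =====
-- def _perms(k, pool):
--     """All k-permutations of pool, in pool order (lexicographic for sorted pool)."""
--     if k == 0:
--         return [()]
--     return [(x,) + rest for x in pool for rest in _perms(k - 1, [y for y in pool if y != x])]
--
--
-- def rentan_keylist(rank: int) -> list:
--     n = 1 if rank == 1 else 2 if rank == 2 else 3
--     return ["comb_" + "".join(str(x) for x in p) for p in _perms(n, list(range(1, 7)))]
-- ===== Notes on version B (the rewrite author's own statement) =====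
-- stated objective: simpler
-- what changed: Replaces the three nested loops with explicit fst/snd/trd inequality checks and rank tests inside each level by a rank-to-length dispatch followed by a recursive k-permutation generator over 1..6, which yields distinct tuples in the same lexicographic order by construction.
import Mathlib
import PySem

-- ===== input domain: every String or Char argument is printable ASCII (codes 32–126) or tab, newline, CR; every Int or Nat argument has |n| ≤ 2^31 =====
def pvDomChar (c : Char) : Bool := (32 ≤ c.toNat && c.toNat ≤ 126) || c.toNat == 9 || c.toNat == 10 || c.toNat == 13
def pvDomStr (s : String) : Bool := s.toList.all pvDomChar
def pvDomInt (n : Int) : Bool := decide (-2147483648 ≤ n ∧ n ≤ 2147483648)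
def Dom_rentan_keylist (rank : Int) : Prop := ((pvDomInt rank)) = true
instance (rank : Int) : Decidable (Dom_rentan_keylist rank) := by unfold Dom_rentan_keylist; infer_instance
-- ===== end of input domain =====

-- B replaces A's nested loops with inequality checks by a rank-to-length dispatch
-- plus a recursive k-permutation generator (objective: simpler).
set_option maxRecDepth 100000


-- ===== PORT A =====
def rentan_keylist (rank : Int) : List String :=
  (PySem.List.pyRange 1 7 1).foldl (fun acc fst =>
    if rank == 1 then acc ++ ["comb_" ++ PySem.Int.toStr fst]
    else (PySem.List.pyRange 1 7 1).foldl (fun acc snd =>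
      if snd != fst && rank == 2 then
        acc ++ ["comb_" ++ PySem.Int.toStr fst ++ PySem.Int.toStr snd]
      else (PySem.List.pyRange 1 7 1).foldl (fun acc trd =>
        if fst != snd && fst != trd && snd != trd then
          acc ++ ["comb_" ++ PySem.Int.toStr fst ++ PySem.Int.toStr snd ++ PySem.Int.toStr trd]
        else acc) acc) acc) []

-- ===== PORT B =====
-- Source B's _perms: all k-permutations of pool, in pool order
def pvPerms (k : Nat) (pool : List Int) : List (List Int) :=
  match k with
  | 0 => [[]]
  | Nat.succ k' => pool.flatMap (fun x => (pvPerms k' (pool.filter (fun y => y ≠ x))).map (fun rest => x :: rest))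

def rentan_keylist_alt (rank : Int) : List String :=
  let n : Nat := if rank == 1 then 1 else if rank == 2 then 2 else 3
  (pvPerms n (PySem.List.pyRange 1 7 1)).map
    (fun p => "comb_" ++ String.join (p.map PySem.Int.toStr))

-- ===== PRECONDITION & SPEC =====
def Spec_rentan_keylist (rank : Int) (out : List String) : Prop := out = rentan_keylist_alt rank
instance (rank : Int) (out : List String) : Decidable (Spec_rentan_keylist rank out) := by unfold Spec_rentan_keylist; infer_instance

-- ===== CLAIM (what is proved, stated in full; the proofs are below) =====
def Claim_equal_rentan_keylist : Prop := ∀ (rank : Int), Dom_rentan_keylist rank → Spec_rentan_keylist rank (rentan_keylist rank)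

-- ===== LEMMAS AND PROOFS =====

-- ===== VERDICT (by name: the statement is the Claim_ definition above) =====
theorem rentan_keylist_spec : Claim_equal_rentan_keylist := by
  intro rank _
  unfold Spec_rentan_keylist
  by_cases h1 : rank = 1
  · subst h1; decide
  · by_cases h2 : rank = 2
    · subst h2; decide
    · have e1 : (rank == 1) = false := by simp [h1]
      have e2 : (rank == 2) = false := by simp [h2]
      simp only [rentan_keylist, rentan_keylist_alt, e1, e2]
      decide
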